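-- pv_equiv track=rewrite | github.com/mmig01/FV.SH | roottest.py | merge_polynomial_by_T
-- ===== SOURCE A (Python) =====
-- n = pow(2, 7)
--
-- def merge_polynomial_by_T(poly_list, T):
--     """
--     poly_list: split_polynomial_by_T 함수의 출력으로 얻은 리스트.
--                예) poly_list = [
--                       [d0_0, d0_1, ..., d0_{n-1}],   # 0번째 자리 (낮은 자리)
--                       [d1_0, d1_1, ..., d1_{n-1}],   # 1번째 자리
--                       ...
--                       [d_L_0, d_L_1, ..., d_L_{n-1}]
--                    ]
--     T: 기저 (base)
--
--     각 다항식의 자리수를 합산하여 원래의 다항식(계수 리스트)을 복원한다.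
--     반환:
--          reconstructed: [c0, c1, ..., c_{n-1}], 여기서
--          c_j = sum_{i=0}^{L} ( poly_list[i][j] * T^i ).
--     """
--     if not poly_list:
--         return []
--
--     n = len(poly_list[0])  # 다항식의 계수 개수
--     L = len(poly_list)     # 분해된 자리수의 개수 (즉, L = floor(log_T(q)) + 1)
--
--     reconstructed = []
--     for j in range(n):
--         coeff = 0
--         for i in range(L):
--             coeff += poly_list[i][j] * (T ** i)
--         reconstructed.append(coeff)
--     return reconstructed
-- ===== SOURCE B (Python) =====
-- def merge_polynomial_by_T(poly_list, T):
--     if not poly_list: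
--         return []
--     n = len(poly_list[0])
--     acc = [0] * n
--     for row in reversed(poly_list):
--         acc = [a * T + r for a, r in zip(acc, row)]
--     return acc
-- ===== Notes on version B (the rewrite author's own statement) =====
-- stated objective: faster
-- what changed: Horner's scheme over the rows in reverse (columnwise acc = acc*T + row) replaces the nested loop that recomputes T**i for every (column, row) pair.
import Mathlib
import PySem

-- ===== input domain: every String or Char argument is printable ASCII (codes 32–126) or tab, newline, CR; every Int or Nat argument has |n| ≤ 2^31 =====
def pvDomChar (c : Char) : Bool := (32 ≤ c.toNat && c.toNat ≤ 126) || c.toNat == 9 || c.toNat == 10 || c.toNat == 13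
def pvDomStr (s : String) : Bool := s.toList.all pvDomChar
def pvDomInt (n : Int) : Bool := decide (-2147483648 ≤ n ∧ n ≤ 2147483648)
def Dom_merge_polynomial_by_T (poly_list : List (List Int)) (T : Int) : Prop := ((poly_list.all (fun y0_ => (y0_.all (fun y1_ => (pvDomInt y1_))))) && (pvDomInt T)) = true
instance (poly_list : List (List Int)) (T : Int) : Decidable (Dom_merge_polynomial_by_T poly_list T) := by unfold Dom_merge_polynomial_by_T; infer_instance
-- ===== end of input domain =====

-- B replaces A's per-column loop of T**i exponentiations by Horner's scheme over the rows in reverse; equal on Pre_ (rows at least as long as the first row, where A does not raise).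

-- ===== PORT A =====
-- pyGetD is exact here: Pre_ keeps every index in range (A raises IndexError outside).
def merge_polynomial_by_T (poly_list : List (List Int)) (T : Int) : List Int :=
  if poly_list = [] then []
  else
    let n : Int := (poly_list.headD []).length
    let L : Int := poly_list.length
    (PySem.List.pyRange 0 n 1).foldl
      (fun reconstructed j =>
        reconstructed ++
          [(PySem.List.pyRange 0 L 1).foldl
            (fun coeff i =>
              coeff + (PySem.List.pyGetD (PySem.List.pyGetD poly_list i []) j 0) * T ^ i.toNat)
            0])
      []

-- ===== PORT B =====
def merge_polynomial_by_T_alt (poly_list : List (List Int)) (T : Int) : List Int :=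
  if poly_list = [] then []
  else
    let n : Nat := (poly_list.headD []).length
    poly_list.reverse.foldl
      (fun acc row => (acc.zip row).map (fun p => p.1 * T + p.2))
      (List.replicate n (0 : Int))

-- ===== PRECONDITION & SPEC =====
-- Pre_ excludes exactly the inputs on which A raises IndexError: a non-empty poly_list with a row shorter than the first row.
def Pre_merge_polynomial_by_T (poly_list : List (List Int)) (T : Int) : Prop :=
  ∀ row ∈ poly_list, (poly_list.headD []).length ≤ row.length
instance (poly_list : List (List Int)) (T : Int) : Decidable (Pre_merge_polynomial_by_T poly_list T) := by unfold Pre_merge_polynomial_by_T; infer_instance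

def pvWitness_merge_polynomial_by_T : List (List Int) × Int := ([[1, 2], [3, 4]], 10)

def Spec_merge_polynomial_by_T (poly_list : List (List Int)) (T : Int) (out : List Int) : Prop := out = merge_polynomial_by_T_alt poly_list T
instance (poly_list : List (List Int)) (T : Int) (out : List Int) : Decidable (Spec_merge_polynomial_by_T poly_list T out) := by unfold Spec_merge_polynomial_by_T; infer_instance

-- ===== CLAIM (what is proved, stated in full; the proofs are below) =====
def Claim_equal_merge_polynomial_by_T : Prop := ∀ (poly_list : List (List Int)) (T : Int), Dom_merge_polynomial_by_T poly_list T → Pre_merge_polynomial_by_T poly_list T → Spec_merge_polynomial_by_T poly_list T (merge_polynomial_by_T poly_list T)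

-- ===== LEMMAS AND PROOFS =====

-- column-k Horner value of a list of rows
def pvHorner (T : Int) (k : Nat) (rows : List (List Int)) : Int :=
  rows.foldr (fun row c => c * T + row.getD k 0) 0

theorem pvHorner_seed (T : Int) (k : Nat) (rows : List (List Int)) (s : Int) :
    rows.foldr (fun row c => c * T + row.getD k 0) s
      = pvHorner T k rows + s * T ^ rows.length := by
  induction rows with
  | nil => simp [pvHorner]
  | cons r rs ih =>
    rw [List.foldr_cons, ih]
    simp only [pvHorner, List.foldr_cons, List.length_cons, pow_succ]
    ring

theorem pvHorner_append (T : Int) (k : Nat) (rs : List (List Int)) (r : List Int) :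
    pvHorner T k (rs ++ [r]) = pvHorner T k rs + r.getD k 0 * T ^ rs.length := by
  unfold pvHorner
  rw [List.foldr_append, pvHorner_seed]
  simp [pvHorner]

-- A's inner loop computes the Horner value of the column
theorem pvInnerA (T : Int) (k : Nat) (rows : List (List Int)) :
    (PySem.List.pyRange 0 (rows.length : Int) 1).foldl
        (fun coeff i =>
          coeff + (PySem.List.pyGetD (PySem.List.pyGetD rows i []) (k : Int) 0) * T ^ i.toNat)
        0
      = pvHorner T k rows := by
  induction rows using List.reverseRecOn with
  | nil => simp [pvHorner]
  | append_singleton rs r ih =>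
    rw [List.length_append]
    have h1 : ((rs.length + 1 : Nat) : Int) = (rs.length : Int) + 1 := by push_cast; ring
    rw [List.length_singleton, h1, PySem.List.pyRange_one_succ_right (by positivity),
      List.foldl_append]
    have hcongr :
        (PySem.List.pyRange 0 (rs.length : Int) 1).foldl
          (fun coeff i =>
            coeff + (PySem.List.pyGetD (PySem.List.pyGetD (rs ++ [r]) i []) (k : Int) 0) * T ^ i.toNat) 0
        = (PySem.List.pyRange 0 (rs.length : Int) 1).foldl
          (fun coeff i =>
            coeff + (PySem.List.pyGetD (PySem.List.pyGetD rs i []) (k : Int) 0) * T ^ i.toNat) 0 := by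
      apply PySem.List.foldl_congr_mem
      intro acc i hi
      rw [PySem.List.mem_pyRange_one] at hi
      obtain ⟨h0, hlt⟩ := hi
      have hnat : i.toNat < rs.length := by omega
      rw [PySem.List.pyGetD_eq_getElem _ _ h0 (by simp; omega),
          PySem.List.pyGetD_eq_getElem _ _ h0 hlt]
      rw [List.getElem_append_left hnat]
    rw [hcongr, ih, pvHorner_append]
    have hlast : PySem.List.pyGetD (rs ++ [r]) (rs.length : Int) [] = r := by
      rw [PySem.List.pyGetD_eq_getElem _ _ (by positivity) (by simp)]
      simp
    simp [hlast]

-- B's fold computes all columns' Horner values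
theorem pvFoldB (T : Int) (n : Nat) (rows : List (List Int))
    (h : ∀ row ∈ rows, n ≤ row.length) :
    rows.foldr
        (fun row acc => (acc.zip row).map (fun p => p.1 * T + p.2))
        (List.replicate n (0 : Int))
      = (List.range n).map (fun k => pvHorner T k rows) := by
  induction rows with
  | nil => simp [pvHorner, List.map_const']
  | cons r rs ih =>
    have hr : n ≤ r.length := h r (by simp)
    rw [List.foldr_cons, ih (fun row hm => h row (by simp [hm]))]
    apply List.ext_getElem
    · simp [pvHorner]; omega
    · intro k hk1 hk2
      have hkn : k < n := by simpa using hk2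
      simp [pvHorner, List.getElem_zip, List.getD_eq_getElem?_getD,
        List.getElem?_eq_getElem (by omega : k < r.length)]

theorem pvPorts_eq (poly_list : List (List Int)) (T : Int)
    (hpre : ∀ row ∈ poly_list, (poly_list.headD []).length ≤ row.length) :
    merge_polynomial_by_T poly_list T = merge_polynomial_by_T_alt poly_list T := by
  unfold merge_polynomial_by_T merge_polynomial_by_T_alt
  by_cases hnil : poly_list = []
  · simp [hnil]
  · simp only [if_neg hnil]
    set n : Nat := (poly_list.headD []).length with hn
    rw [List.foldl_reverse, pvFoldB T n poly_list hpre]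
    rw [PySem.List.foldl_append_singleton_eq_map, List.nil_append]
    rw [PySem.List.pyRange_zero_nat n, List.map_map]
    apply List.map_congr_left
    intro k hk
    simp only [Function.comp]
    exact pvInnerA T k poly_list

-- ===== VERDICT (by name: the statement is the Claim_ definition above) =====
theorem merge_polynomial_by_T_spec : Claim_equal_merge_polynomial_by_T := by
  intro poly_list T _ hpre
  unfold Spec_merge_polynomial_by_T
  exact pvPorts_eq poly_list T hpre
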